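-- pv_equiv track=rewrite | github.com/TengFeiyang01/Algorithm | bishi/9-9中兴/a.py | find_busiest_servers
-- ===== SOURCE A (Python) =====
-- def find_busiest_servers(k, m, n):
--     servers = [0] * k
--     tasks_count = [0] * k
--
--     for i in range(len(m)):
--         start = i % k
--         assigned = False
--         for j in range(k):
--             idx = (start + j) % k
--             if servers[idx] <= m[i]:
--                 servers[idx] = m[i] + n[i]
--                 tasks_count[idx] += 1
--                 assigned = True
--                 break
--         if not assigned:
--             continue
--
--     max_tasks = max(tasks_count)
--     busiest_servers = [i for i in range(k) if tasks_count[i] == max_tasks]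
--
--     return busiest_servers
-- ===== SOURCE B (Python) =====
-- def _mn(tr):
--     return tr[0] if isinstance(tr, list) else tr
--
--
-- def _build(sz):
--     # segment tree node for a block of sz servers, all initially free (end-time 0);
--     # leaf = end-time (int), node = [min_end, left_size, left, right]
--     if sz == 1:
--         return 0
--     sl = sz // 2
--     l = _build(sl)
--     r = _build(sz - sl)
--     return [min(_mn(l), _mn(r)), sl, l, r]
--
--
-- def _upd(tr, i, v):
--     # functional point update of leaf i to value v, recomputing cached minima
--     if not isinstance(tr, list):
--         return v
--     mn, sl, l, r = tr
--     if i < sl: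
--         l = _upd(l, i, v)
--     else:
--         r = _upd(r, i - sl, v)
--     return [min(_mn(l), _mn(r)), sl, l, r]
--
--
-- def _qf(tr, lo, t):
--     # first leaf index >= lo whose end-time <= t, pruning subtrees whose min > t
--     if not isinstance(tr, list):
--         return 0 if lo <= 0 and tr <= t else None
--     mn, sl, l, r = tr
--     if t < mn:
--         return None
--     j = _qf(l, lo, t) if lo < sl else None
--     if j is not None:
--         return j
--     j = _qf(r, lo - sl, t)
--     return sl + j if j is not None else None
--
--
-- def find_busiest_servers(k, m, n):
--     tree = _build(k)
--     count = [0] * k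
--     for i in range(len(m)):
--         t = m[i]
--         start = i % k
--         j = _qf(tree, start, t)
--         if j is None:
--             j = _qf(tree, 0, t)
--         if j is not None:
--             tree = _upd(tree, j, t + n[i])
--             count[j] += 1
--     mx = max(count)
--     return [i for i in range(k) if count[i] == mx]
-- ===== Notes on version B (the rewrite author's own statement) =====
-- stated objective: faster
-- what changed: A's per-task linear circular scan over all k servers is replaced by a segment tree of minimum end-times supporting 'first index >= lo with end-time <= t' (queried once from start and, on wrap-around, once from 0), so each task costs O(log k) instead of O(k).
-- outside the precondition, e.g. on find_busiest_servers(1, [0, 0], [5]): A returns [0], B returns [0]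
import Mathlib
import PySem

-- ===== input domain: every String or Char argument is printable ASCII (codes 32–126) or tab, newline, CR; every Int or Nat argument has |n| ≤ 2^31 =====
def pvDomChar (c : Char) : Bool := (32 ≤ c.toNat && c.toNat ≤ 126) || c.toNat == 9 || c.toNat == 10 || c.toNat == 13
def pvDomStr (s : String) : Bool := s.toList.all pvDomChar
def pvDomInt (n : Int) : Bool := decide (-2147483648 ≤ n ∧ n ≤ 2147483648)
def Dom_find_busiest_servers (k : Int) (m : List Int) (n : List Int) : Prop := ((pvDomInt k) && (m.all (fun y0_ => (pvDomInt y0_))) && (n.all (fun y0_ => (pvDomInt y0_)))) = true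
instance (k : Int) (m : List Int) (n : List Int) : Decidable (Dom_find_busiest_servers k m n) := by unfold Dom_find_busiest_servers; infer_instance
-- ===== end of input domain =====

-- B replaces A's O(k) circular linear scan per task by a segment tree of minimum server
-- end-times answering "first index ≥ lo whose end-time ≤ t" in O(log k) (objective: faster).

-- ===== PORT A =====
-- The two Python lists servers/tasks_count are held as Array Int so that the in-range
-- index reads/writes of the algorithm cost O(1) as in Python; pvAGet/pvASet are exact
-- for the in-range indices the algorithm uses (every index here is i % k ∈ [0, k)).
def pvAGet (a : Array Int) (i : Int) (d : Int) : Int :=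
  if h : 0 ≤ i ∧ i.toNat < a.size then a[i.toNat]'h.2 else d

def pvASet (a : Array Int) (i : Int) (v : Int) : Array Int :=
  a.setIfInBounds i.toNat v

-- A's inner 'for j in range(k): idx=(start+j)%k; if servers[idx]<=m[i]: ...; break' is the
-- first j in range(k) whose server is free, ported as find? over the same range.
def pvStepA (k : Int) (m : List Int) (n : List Int)
    (st : Array Int × Array Int) (i : Int) : Array Int × Array Int :=
  let servers := st.1
  let tasks_count := st.2
  let start := PySem.Int.mod i k
  match (PySem.List.pyRange 0 k 1).find?
      (fun j => decide (pvAGet servers (PySem.Int.mod (start + j) k) 0 ≤ PySem.List.pyGetD m i 0)) with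
  | some j =>
      let idx := PySem.Int.mod (start + j) k
      (pvASet servers idx (PySem.List.pyGetD m i 0 + PySem.List.pyGetD n i 0),
       pvASet tasks_count idx (pvAGet tasks_count idx 0 + 1))
  | none => (servers, tasks_count)

def find_busiest_servers (k : Int) (m : List Int) (n : List Int) : List Int :=
  let init := ((List.replicate k.toNat (0 : Int)).toArray, (List.replicate k.toNat (0 : Int)).toArray)
  let fin := (PySem.List.pyRange 0 (m.length : Int) 1).foldl (pvStepA k m n) init
  match PySem.List.max? fin.2.toList (fun x => x) with
  | none => []   -- unreachable inside Pre_ (k ≥ 1); Python raises ValueError here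
  | some mx => (PySem.List.pyRange 0 k 1).filter
      (fun i => decide (pvAGet fin.2 i 0 = mx))

-- ===== PORT B =====
-- leaf = one server's end-time; node mn sl l r = cached minimum, size of left subtree, children
inductive PvTree where
  | leaf : Int → PvTree
  | node : Int → Int → PvTree → PvTree → PvTree
deriving DecidableEq, Repr

def pvMn : PvTree → Int
  | .leaf v => v
  | .node mn _ _ _ => mn

-- Python's '_build(sz)' tests 'sz == 1'; the guard 'sz ≤ 1' additionally totalizes the
-- (unreachable from calls with sz ≥ 1) nonpositive case — same value on every reachable call.
def pvBuild (sz : Int) : PvTree :=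
  if sz ≤ 1 then .leaf 0
  else
    let sl := PySem.Int.floordiv sz 2
    let l := pvBuild sl
    let r := pvBuild (sz - sl)
    .node (min (pvMn l) (pvMn r)) sl l r
termination_by sz.toNat
decreasing_by
  all_goals
    rw [PySem.Int.floordiv_eq_ediv_of_pos (by omega)]
    omega

def pvUpd : PvTree → Int → Int → PvTree
  | .leaf _, _, v => .leaf v
  | .node _ sl l r, i, v =>
    if i < sl then
      let l' := pvUpd l i v
      .node (min (pvMn l') (pvMn r)) sl l' r
    else
      let r' := pvUpd r (i - sl) v
      .node (min (pvMn l) (pvMn r')) sl l r'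

def pvQf : PvTree → Int → Int → Option Int
  | .leaf v, lo, t => if lo ≤ 0 ∧ v ≤ t then some 0 else none
  | .node mn sl l r, lo, t =>
    if t < mn then none
    else
      match (if lo < sl then pvQf l lo t else none) with
      | some j => some j
      | none =>
        match pvQf r (lo - sl) t with
        | some j => some (sl + j)
        | none => none

def pvStepB (k : Int) (m : List Int) (n : List Int) (st : PvTree × Array Int) (i : Int) : PvTree × Array Int :=
  let tree := st.1
  let count := st.2
  let t := PySem.List.pyGetD m i 0
  let start := PySem.Int.mod i k
  let j1 := match pvQf tree start t with
    | some j => some j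
    | none => pvQf tree 0 t
  match j1 with
  | some j => (pvUpd tree j (t + PySem.List.pyGetD n i 0),
               pvASet count j (pvAGet count j 0 + 1))
  | none => (tree, count)

def find_busiest_servers_alt (k : Int) (m : List Int) (n : List Int) : List Int :=
  let init := (pvBuild k, (List.replicate k.toNat (0 : Int)).toArray)
  let fin := (PySem.List.pyRange 0 (m.length : Int) 1).foldl (pvStepB k m n) init
  match PySem.List.max? fin.2.toList (fun x => x) with
  | none => []   -- Python raises ValueError (max of empty) here; unreachable inside Pre_
  | some mx => (PySem.List.pyRange 0 k 1).filter
      (fun i => decide (pvAGet fin.2 i 0 = mx))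

-- ===== PRECONDITION & SPEC =====
-- Pre_ excludes k ≤ 0, where A raises ValueError (max of an empty list), and restricts to the
-- natural domain len(m) ≤ len(n): outside it A raises IndexError whenever a task with index
-- ≥ len(n) is assigned a server; on the rare such inputs where those tasks all stay unassigned
-- A returns and B returns the same value (see the cite).
def Pre_find_busiest_servers (k : Int) (m : List Int) (n : List Int) : Prop :=
  1 ≤ k ∧ m.length ≤ n.length
instance (k : Int) (m : List Int) (n : List Int) : Decidable (Pre_find_busiest_servers k m n) := by
  unfold Pre_find_busiest_servers; infer_instance
def pvWitness_find_busiest_servers : Int × List Int × List Int := (2, [1, 3, 2], [2, 1, 4])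

def Spec_find_busiest_servers (k : Int) (m : List Int) (n : List Int) (out : List Int) : Prop := out = find_busiest_servers_alt k m n
instance (k : Int) (m : List Int) (n : List Int) (out : List Int) : Decidable (Spec_find_busiest_servers k m n out) := by unfold Spec_find_busiest_servers; infer_instance

-- ===== CLAIM (what is proved, stated in full; the proofs are below) =====
def Claim_equal_find_busiest_servers : Prop := ∀ (k : Int) (m : List Int) (n : List Int), Dom_find_busiest_servers k m n → Pre_find_busiest_servers k m n → Spec_find_busiest_servers k m n (find_busiest_servers k m n)

-- ===== LEMMAS AND PROOFS =====

def pvLeaves : PvTree → List Int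
  | .leaf v => [v]
  | .node _ _ l r => pvLeaves l ++ pvLeaves r

def pvWF : PvTree → Prop
  | .leaf _ => True
  | .node mn sl l r => pvWF l ∧ pvWF r ∧ sl = ((pvLeaves l).length : Int) ∧ mn = min (pvMn l) (pvMn r)

-- the first free index in [a,b): A's circular scan and B's tree query both reduce to this
def pvFirst (a b : Int) (P : Int → Bool) : Option Int := (PySem.List.pyRange a b 1).find? P

lemma pvFirst_split (a c b : Int) (h1 : a ≤ c) (h2 : c ≤ b) (P : Int → Bool) :
    pvFirst a b P = (pvFirst a c P).or (pvFirst c b P) := by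
  unfold pvFirst
  rw [PySem.List.pyRange_one_append a c b h1 h2, List.find?_append]

lemma pvFirst_eq_none (a b : Int) (P : Int → Bool)
    (h : ∀ x, a ≤ x → x < b → P x = false) : pvFirst a b P = none := by
  unfold pvFirst
  rw [List.find?_eq_none]
  intro x hx
  rw [PySem.List.mem_pyRange_one] at hx
  simp [h x hx.1 hx.2]

lemma pv_find?_congr {α : Type} (l : List α) (P Q : α → Bool)
    (h : ∀ x ∈ l, P x = Q x) : l.find? P = l.find? Q := by
  induction l with
  | nil => rfl
  | cons y t ih =>
    simp only [List.find?_cons]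
    rw [h y (by simp)]
    cases Q y
    · exact ih fun x hx => h x (by simp [hx])
    · rfl

lemma pvFirst_congr (a b : Int) (P Q : Int → Bool)
    (h : ∀ x, a ≤ x → x < b → P x = Q x) : pvFirst a b P = pvFirst a b Q := by
  unfold pvFirst
  exact pv_find?_congr _ _ _ fun x hx => by
    rw [PySem.List.mem_pyRange_one] at hx; exact h x hx.1 hx.2

lemma pvFirst_shift (a b c : Int) (P : Int → Bool) :
    pvFirst (a + c) (b + c) P = Option.map (· + c) (pvFirst a b (fun j => P (j + c))) := by
  unfold pvFirst
  rw [PySem.List.pyRange_one (a + c) (b + c), PySem.List.pyRange_one a b]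
  have hd : b + c - (a + c) = b - a := by ring
  rw [hd, List.find?_map, List.find?_map, Option.map_map]
  have : (List.find? ((fun j => P (j + c)) ∘ fun k_1 => a + ↑k_1) (List.range (b - a).toNat))
      = (List.find? (P ∘ fun k_1 => a + c + ↑k_1) (List.range (b - a).toNat)) := by
    apply pv_find?_congr
    intro x _
    simp only [Function.comp]
    congr 1
    ring
  rw [this]
  congr 1
  funext x
  simp only [Function.comp]
  ring

lemma pv_mem_of_pvFirst (a b : Int) (P : Int → Bool) (j : Int)
    (h : pvFirst a b P = some j) : a ≤ j ∧ j < b ∧ P j = true := by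
  unfold pvFirst at h
  have hm := List.mem_of_find?_eq_some h
  rw [PySem.List.mem_pyRange_one] at hm
  exact ⟨hm.1, hm.2, List.find?_some h⟩

lemma pv_mn_le (t : PvTree) (h : pvWF t) : ∀ x ∈ pvLeaves t, pvMn t ≤ x := by
  induction t with
  | leaf v => intro x hx; simp [pvLeaves] at hx; simp [pvMn, hx]
  | node mn sl l r ihl ihr =>
    obtain ⟨hl, hr, hsl, hmn⟩ := h
    intro x hx
    simp only [pvLeaves, List.mem_append] at hx
    simp only [pvMn, hmn]
    rcases hx with hx | hx
    · exact le_trans (min_le_left _ _) (ihl hl x hx)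
    · exact le_trans (min_le_right _ _) (ihr hr x hx)

lemma pv_leaves_length_pos (t : PvTree) : 0 < (pvLeaves t).length := by
  induction t with
  | leaf v => simp [pvLeaves]
  | node mn sl l r ihl ihr => simp only [pvLeaves, List.length_append]; omega

lemma pv_build_spec (sz : Int) (h : 1 ≤ sz) :
    pvLeaves (pvBuild sz) = List.replicate sz.toNat 0 ∧ pvWF (pvBuild sz) := by
  induction hi : sz.toNat using Nat.strong_induction_on generalizing sz with
  | _ N ih =>
  rw [pvBuild]
  by_cases h1 : sz ≤ 1
  · have : sz = 1 := by omega
    subst this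
    have hN : N = 1 := by omega
    subst hN
    simp [pvLeaves, pvWF]
  · rw [if_neg h1]
    have he : PySem.Int.floordiv sz 2 = sz / 2 := PySem.Int.floordiv_eq_ediv_of_pos (by omega)
    have hsl1 : 1 ≤ sz / 2 := by omega
    have hsl2 : sz / 2 < sz := by omega
    have hr1 : 1 ≤ sz - sz / 2 := by omega
    have ihl := ih (sz / 2).toNat (by omega) (sz / 2) hsl1 rfl
    have ihr := ih (sz - sz / 2).toNat (by omega) (sz - sz / 2) hr1 rfl
    rw [he] at *
    refine ⟨?_, ihl.2, ihr.2, ?_, rfl⟩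
    · simp only [pvLeaves, ihl.1, ihr.1]
      rw [← List.replicate_add]
      congr 1
      omega
    · rw [ihl.1, List.length_replicate]
      omega

lemma pv_upd_spec (t : PvTree) : ∀ (i v : Int), pvWF t → 0 ≤ i → i < ((pvLeaves t).length : Int) →
    pvLeaves (pvUpd t i v) = (pvLeaves t).set i.toNat v ∧ pvWF (pvUpd t i v) := by
  induction t with
  | leaf w =>
    intro i v h h0 h1
    simp only [pvLeaves, List.length_singleton, Nat.cast_one] at h1
    have hi : i.toNat = 0 := by omega
    simp [pvLeaves, pvUpd, pvWF, hi]
  | node mn sl l r ihl ihr =>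
    intro i v h h0 h1
    obtain ⟨hl, hr, hsl, hmn⟩ := h
    simp only [pvLeaves, List.length_append, Nat.cast_add] at h1
    by_cases hc : i < sl
    · have hil : i < ((pvLeaves l).length : Int) := by omega
      obtain ⟨hle, hwf⟩ := ihl i v hl h0 hil
      have hred : pvUpd (PvTree.node mn sl l r) i v
          = PvTree.node (min (pvMn (pvUpd l i v)) (pvMn r)) sl (pvUpd l i v) r := by
        simp [pvUpd, hc]
      rw [hred]
      constructor
      · show pvLeaves (pvUpd l i v) ++ pvLeaves r = (pvLeaves l ++ pvLeaves r).set i.toNat v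
        rw [hle, List.set_append_left _ _ (by omega)]
      · exact ⟨hwf, hr, by rw [hle, List.length_set]; exact hsl, rfl⟩
    · have hi0 : 0 ≤ i - sl := by omega
      have hir : i - sl < ((pvLeaves r).length : Int) := by omega
      obtain ⟨hre, hwf⟩ := ihr (i - sl) v hr hi0 hir
      have hred : pvUpd (PvTree.node mn sl l r) i v
          = PvTree.node (min (pvMn l) (pvMn (pvUpd r (i - sl) v))) sl l (pvUpd r (i - sl) v) := by
        simp [pvUpd, hc]
      rw [hred]
      constructor
      · show pvLeaves l ++ pvLeaves (pvUpd r (i - sl) v) = (pvLeaves l ++ pvLeaves r).set i.toNat v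
        rw [hre, List.set_append_right _ _ (by omega)]
        have : (i - sl).toNat = i.toNat - (pvLeaves l).length := by omega
        rw [this]
      · exact ⟨hl, hwf, hsl, rfl⟩

lemma pv_getD_append_left (L R : List Int) (j : Int) (h0 : 0 ≤ j) (h1 : j < (L.length : Int)) :
    PySem.List.pyGetD (L ++ R) j 0 = PySem.List.pyGetD L j 0 := by
  rw [PySem.List.pyGetD_eq_getElem _ _ h0 (by simp; omega),
    PySem.List.pyGetD_eq_getElem _ _ h0 h1]
  exact List.getElem_append_left (by omega)

lemma pv_getD_append_right (L R : List Int) (j : Int) (h1 : (L.length : Int) ≤ j) (h0 : 0 ≤ j)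
    (h2 : j < ((L.length : Int) + (R.length : Int))) :
    PySem.List.pyGetD (L ++ R) j 0 = PySem.List.pyGetD R (j - L.length) 0 := by
  rw [PySem.List.pyGetD_eq_getElem _ _ h0 (by simp; omega),
    PySem.List.pyGetD_eq_getElem _ _ (by omega) (by omega)]
  rw [List.getElem_append_right (by omega)]
  congr 1
  omega

lemma pv_getD_mem (L : List Int) (j : Int) (h0 : 0 ≤ j) (h1 : j < (L.length : Int)) :
    PySem.List.pyGetD L j 0 ∈ L := by
  rw [PySem.List.pyGetD_eq_getElem _ _ h0 h1]
  exact List.getElem_mem _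

lemma pv_qf_spec (t : PvTree) : ∀ (lo tt : Int), pvWF t →
    pvQf t lo tt = pvFirst 0 ((pvLeaves t).length : Int)
      (fun j => decide (lo ≤ j) && decide (PySem.List.pyGetD (pvLeaves t) j 0 ≤ tt)) := by
  induction t with
  | leaf v =>
    intro lo tt h
    simp only [pvQf, pvLeaves, List.length_singleton, pvFirst]
    rw [show ((1 : Nat) : Int) = 0 + 1 from rfl, PySem.List.pyRange_one_singleton]
    simp only [List.find?_cons]
    by_cases hc : lo ≤ 0 ∧ v ≤ tt
    · simp [hc.1, hc.2, PySem.List.pyGetD]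
    · rw [if_neg hc]
      rcases not_and_or.mp hc with hc1 | hc1 <;>
        simp [hc1, PySem.List.pyGetD, List.find?]
  | node mn sl l r ihl ihr =>
    intro lo tt h
    obtain ⟨hl, hr, hsl, hmn⟩ := h
    have hLpos := pv_leaves_length_pos l
    have hRpos := pv_leaves_length_pos r
    have hlen : ((pvLeaves (PvTree.node mn sl l r)).length : Int)
        = ((pvLeaves l).length : Int) + ((pvLeaves r).length : Int) := by
      simp [pvLeaves]
    by_cases hprune : tt < mn
    · simp only [pvQf, hprune, if_true]
      symm
      apply pvFirst_eq_none
      intro x hx0 hxb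
      rw [hlen] at hxb
      have hle := pv_mn_le (PvTree.node mn sl l r) ⟨hl, hr, hsl, hmn⟩
        (PySem.List.pyGetD (pvLeaves (PvTree.node mn sl l r)) x 0)
        (pv_getD_mem _ x hx0 (by rw [hlen]; omega))
      simp only [pvMn] at hle
      simp only [Bool.and_eq_false_iff, decide_eq_false_iff_not, not_le]
      right
      exact lt_of_lt_of_le hprune hle
    · simp only [pvQf, hprune, if_false]
      rw [hlen]
      rw [pvFirst_split 0 ((pvLeaves l).length : Int) _ (by positivity) (by omega)]
      have hpart1 : pvFirst 0 ((pvLeaves l).length : Int)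
          (fun j => decide (lo ≤ j) && decide (PySem.List.pyGetD (pvLeaves (PvTree.node mn sl l r)) j 0 ≤ tt))
          = (if lo < sl then pvQf l lo tt else none) := by
        by_cases hc : lo < sl
        · rw [if_pos hc, ihl lo tt hl]
          apply pvFirst_congr
          intro x hx0 hxb
          congr 1
          rw [show pvLeaves (PvTree.node mn sl l r) = pvLeaves l ++ pvLeaves r from rfl]
          rw [pv_getD_append_left _ _ x hx0 hxb]
        · rw [if_neg hc]
          apply pvFirst_eq_none
          intro x hx0 hxb
          have : ¬ lo ≤ x := by omega
          simp [this]
      have hpart2 : pvFirst ((pvLeaves l).length : Int) (((pvLeaves l).length : Int) + ((pvLeaves r).length : Int))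
          (fun j => decide (lo ≤ j) && decide (PySem.List.pyGetD (pvLeaves (PvTree.node mn sl l r)) j 0 ≤ tt))
          = Option.map (· + ((pvLeaves l).length : Int)) (pvQf r (lo - sl) tt) := by
        have e := pvFirst_shift 0 ((pvLeaves r).length : Int) ((pvLeaves l).length : Int)
          (fun j => decide (lo ≤ j) && decide (PySem.List.pyGetD (pvLeaves (PvTree.node mn sl l r)) j 0 ≤ tt))
        rw [zero_add, add_comm ((pvLeaves r).length : Int) ((pvLeaves l).length : Int)] at e
        rw [e, ihr (lo - sl) tt hr]
        congr 1
        apply pvFirst_congr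
        intro x hx0 hxb
        have h1 : (decide (lo ≤ x + ((pvLeaves l).length : Int)) : Bool) = decide (lo - sl ≤ x) := by
          simp only [decide_eq_decide]
          omega
        have h2 : PySem.List.pyGetD (pvLeaves (PvTree.node mn sl l r)) (x + ((pvLeaves l).length : Int)) 0
            = PySem.List.pyGetD (pvLeaves r) x 0 := by
          rw [show pvLeaves (PvTree.node mn sl l r) = pvLeaves l ++ pvLeaves r from rfl]
          rw [pv_getD_append_right _ _ _ (by omega) (by omega) (by omega)]
          congr 1
          ring
        rw [h1, h2]
      rw [hpart1, hpart2]
      cases hq1 : (if lo < sl then pvQf l lo tt else none) with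
      | some j => rfl
      | none =>
        cases hq2 : pvQf r (lo - sl) tt with
        | some j =>
          simp only [Option.or, Option.map]
          congr 1
          omega
        | none => rfl

-- A's circular scan = B's two straight queries (first free ≥ start, else first free overall)
lemma pv_circ (k s : Int) (hk : 0 < k) (hs0 : 0 ≤ s) (hs1 : s < k) (P : Int → Bool) :
    Option.map (fun j => PySem.Int.mod (s + j) k)
      (pvFirst 0 k (fun j => P (PySem.Int.mod (s + j) k)))
    = (pvFirst s k P).or (pvFirst 0 k P) := by
  have hmod : ∀ x : Int, 0 ≤ x → x < k → PySem.Int.mod x k = x := fun x h0 h1 => by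
    rw [PySem.Int.mod_eq_emod_of_pos hk, Int.emod_eq_of_lt h0 h1]
  have hmod2 : ∀ x : Int, k ≤ x → x < 2 * k → PySem.Int.mod x k = x - k := fun x h0 h1 => by
    rw [PySem.Int.mod_eq_emod_of_pos hk, ← Int.sub_emod_right x k,
      Int.emod_eq_of_lt (by omega) (by omega)]
  -- split A's offset range at k - s
  rw [pvFirst_split 0 (k - s) k (by omega) (by omega)]
  -- part 1 : offsets j ∈ [0, k-s) reach indices s + j ∈ [s, k)
  have hp1 : pvFirst 0 (k - s) (fun j => P (PySem.Int.mod (s + j) k))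
      = pvFirst 0 (k - s) (fun j => P (j + s)) :=
    pvFirst_congr _ _ _ _ fun x hx0 hxb => by
      rw [show s + x = x + s by ring, hmod (x + s) (by omega) (by omega)]
  have hX : pvFirst s k P
      = Option.map (· + s) (pvFirst 0 (k - s) (fun j => P (j + s))) := by
    have := pvFirst_shift 0 (k - s) s P
    rw [show (0 : Int) + s = s by ring, show k - s + s = k by ring] at this
    exact this
  -- part 2 : offsets j ∈ [k-s, k) wrap to indices j - (k - s) ∈ [0, s)
  have hp2 : pvFirst (k - s) k (fun j => P (PySem.Int.mod (s + j) k))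
      = Option.map (· + (k - s)) (pvFirst 0 s P) := by
    have e1 : pvFirst (k - s) k (fun j => P (PySem.Int.mod (s + j) k))
        = pvFirst (k - s) k (fun j => P (j + (s - k))) :=
      pvFirst_congr _ _ _ _ fun x hx0 hxb => by
        rw [hmod2 (s + x) (by omega) (by omega)]
        congr 1
        ring
    have e2 := pvFirst_shift 0 s (k - s) (fun j => P (j + (s - k)))
    rw [show (0 : Int) + (k - s) = k - s by ring, show s + (k - s) = k by ring] at e2
    rw [e1, e2]
    congr 1
    exact pvFirst_congr _ _ _ _ fun x hx0 hxb => by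
      congr 1
      ring
  rw [hp1, hp2]
  -- case on the two straight searches
  cases hXv : pvFirst 0 (k - s) (fun j => P (j + s)) with
  | some j =>
    obtain ⟨hj0, hjb, _⟩ := pv_mem_of_pvFirst _ _ _ _ hXv
    simp only [Option.or, Option.map, hX, hXv]
    rw [hmod (s + j) (by omega) (by omega)]
    congr 1
    ring
  | none =>
    have hsk : pvFirst s k P = none := by rw [hX, hXv]; rfl
    rw [hsk]
    rw [pvFirst_split 0 s k hs0 (by omega) P, hsk]
    cases hYv : pvFirst 0 s P with
    | some y =>
      obtain ⟨hy0, hyb, _⟩ := pv_mem_of_pvFirst _ _ _ _ hYv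
      simp only [Option.or, Option.map]
      rw [show s + (y + (k - s)) = y + k by ring, hmod2 (y + k) (by omega) (by omega)]
      congr 1
      ring
    | none => rfl

lemma pvAGet_eq (a : Array Int) (i d : Int) (h : 0 ≤ i) :
    pvAGet a i d = PySem.List.pyGetD a.toList i d := by
  rw [PySem.List.pyGetD_of_nonneg _ _ h]
  unfold pvAGet
  by_cases hlt : i.toNat < a.size
  · rw [dif_pos ⟨h, hlt⟩, List.getD_eq_getElem?_getD,
      List.getElem?_eq_getElem (by simpa using hlt)]
    simp
  · rw [dif_neg (by tauto), List.getD_eq_getElem?_getD,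
      List.getElem?_eq_none (by simp; omega)]
    rfl

lemma pvASet_toList (a : Array Int) (i v : Int) :
    (pvASet a i v).toList = a.toList.set i.toNat v := by
  unfold pvASet
  rw [Array.toList_setIfInBounds]

-- relation carried through the fold: B's tree mirrors A's server list, counts are equal
def pvRel (k : Int) (st : Array Int × Array Int) (stB : PvTree × Array Int) : Prop :=
  pvLeaves stB.1 = st.1.toList ∧ stB.2 = st.2 ∧ pvWF stB.1 ∧ st.1.toList.length = k.toNat

lemma pv_step_rel (k : Int) (m n : List Int) (hk : 0 < k)
    (st : Array Int × Array Int) (stB : PvTree × Array Int) (i : Int)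
    (h : pvRel k st stB) :
    pvRel k (pvStepA k m n st i) (pvStepB k m n stB i) := by
  obtain ⟨hleaves, hcnt, hwf, hlen⟩ := h
  have hs0 : 0 ≤ PySem.Int.mod i k := PySem.Int.mod_nonneg _ hk
  have hs1 : PySem.Int.mod i k < k := PySem.Int.mod_lt _ hk
  have hlenI : ((pvLeaves stB.1).length : Int) = k := by
    rw [hleaves, hlen]; omega
  -- B's selection in terms of pvFirst
  have hq1 : pvQf stB.1 (PySem.Int.mod i k) (PySem.List.pyGetD m i 0)
      = pvFirst (PySem.Int.mod i k) k
          (fun j => decide (PySem.List.pyGetD st.1.toList j 0 ≤ PySem.List.pyGetD m i 0)) := by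
    rw [pv_qf_spec stB.1 (PySem.Int.mod i k) (PySem.List.pyGetD m i 0) hwf, hlenI, hleaves]
    rw [pvFirst_split 0 (PySem.Int.mod i k) k hs0 (by omega)]
    have h1 : pvFirst 0 (PySem.Int.mod i k)
        (fun j => decide (PySem.Int.mod i k ≤ j) && decide (PySem.List.pyGetD st.1.toList j 0 ≤ PySem.List.pyGetD m i 0)) = none :=
      pvFirst_eq_none _ _ _ fun x hx0 hxb => by
        have : ¬ PySem.Int.mod i k ≤ x := by omega
        simp [this]
    have h2 : pvFirst (PySem.Int.mod i k) k
        (fun j => decide (PySem.Int.mod i k ≤ j) && decide (PySem.List.pyGetD st.1.toList j 0 ≤ PySem.List.pyGetD m i 0))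
        = pvFirst (PySem.Int.mod i k) k
          (fun j => decide (PySem.List.pyGetD st.1.toList j 0 ≤ PySem.List.pyGetD m i 0)) :=
      pvFirst_congr _ _ _ _ fun x hx0 hxb => by simp [hx0]
    rw [h1, h2]
    rfl
  have hq0 : pvQf stB.1 0 (PySem.List.pyGetD m i 0)
      = pvFirst 0 k (fun j => decide (PySem.List.pyGetD st.1.toList j 0 ≤ PySem.List.pyGetD m i 0)) := by
    rw [pv_qf_spec stB.1 0 (PySem.List.pyGetD m i 0) hwf, hlenI, hleaves]
    exact pvFirst_congr _ _ _ _ fun x hx0 hxb => by simp [hx0]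
  have hA : Option.map (fun j => PySem.Int.mod (PySem.Int.mod i k + j) k)
      (pvFirst 0 k (fun j => decide (PySem.List.pyGetD st.1.toList (PySem.Int.mod (PySem.Int.mod i k + j) k) 0 ≤ PySem.List.pyGetD m i 0)))
      = (pvFirst (PySem.Int.mod i k) k (fun j => decide (PySem.List.pyGetD st.1.toList j 0 ≤ PySem.List.pyGetD m i 0))).or
        (pvFirst 0 k (fun j => decide (PySem.List.pyGetD st.1.toList j 0 ≤ PySem.List.pyGetD m i 0))) :=
    pv_circ k (PySem.Int.mod i k) hk hs0 hs1
      (fun idx => decide (PySem.List.pyGetD st.1.toList idx 0 ≤ PySem.List.pyGetD m i 0))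
  have hpredA : (PySem.List.pyRange 0 k 1).find?
      (fun j => decide (pvAGet st.1 (PySem.Int.mod (PySem.Int.mod i k + j) k) 0 ≤ PySem.List.pyGetD m i 0))
      = pvFirst 0 k (fun j => decide (PySem.List.pyGetD st.1.toList (PySem.Int.mod (PySem.Int.mod i k + j) k) 0 ≤ PySem.List.pyGetD m i 0)) :=
    pv_find?_congr _ _ _ fun x _ => by
      rw [pvAGet_eq _ _ _ (PySem.Int.mod_nonneg _ hk)]
  have hAeq : pvStepA k m n st i
      = (match pvFirst 0 k (fun j => decide (PySem.List.pyGetD st.1.toList (PySem.Int.mod (PySem.Int.mod i k + j) k) 0 ≤ PySem.List.pyGetD m i 0)) with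
        | some j =>
            (pvASet st.1 (PySem.Int.mod (PySem.Int.mod i k + j) k)
               (PySem.List.pyGetD m i 0 + PySem.List.pyGetD n i 0),
             pvASet st.2 (PySem.Int.mod (PySem.Int.mod i k + j) k)
               (pvAGet st.2 (PySem.Int.mod (PySem.Int.mod i k + j) k) 0 + 1))
        | none => (st.1, st.2)) := by
    rw [← hpredA]
    rfl
  have hBeq : pvStepB k m n stB i
      = (match (match pvQf stB.1 (PySem.Int.mod i k) (PySem.List.pyGetD m i 0) with
            | some j => some j
            | none => pvQf stB.1 0 (PySem.List.pyGetD m i 0)) with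
        | some j =>
            (pvUpd stB.1 j (PySem.List.pyGetD m i 0 + PySem.List.pyGetD n i 0),
             pvASet stB.2 j (pvAGet stB.2 j 0 + 1))
        | none => (stB.1, stB.2)) := rfl
  cases hOA : pvFirst 0 k (fun j => decide (PySem.List.pyGetD st.1.toList (PySem.Int.mod (PySem.Int.mod i k + j) k) 0 ≤ PySem.List.pyGetD m i 0)) with
  | none =>
    have hOB : (pvFirst (PySem.Int.mod i k) k (fun j => decide (PySem.List.pyGetD st.1.toList j 0 ≤ PySem.List.pyGetD m i 0))).or
        (pvFirst 0 k (fun j => decide (PySem.List.pyGetD st.1.toList j 0 ≤ PySem.List.pyGetD m i 0))) = none := by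
      rw [← hA, hOA]; rfl
    have h1 : pvFirst (PySem.Int.mod i k) k (fun j => decide (PySem.List.pyGetD st.1.toList j 0 ≤ PySem.List.pyGetD m i 0)) = none := by
      cases hy : pvFirst (PySem.Int.mod i k) k (fun j => decide (PySem.List.pyGetD st.1.toList j 0 ≤ PySem.List.pyGetD m i 0)) with
      | none => rfl
      | some y => rw [hy] at hOB; simp [Option.or] at hOB
    have h0 : pvFirst 0 k (fun j => decide (PySem.List.pyGetD st.1.toList j 0 ≤ PySem.List.pyGetD m i 0)) = none := by
      rw [h1] at hOB; simpa [Option.or] using hOB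
    rw [hAeq, hBeq, hOA, hq1, hq0, h1, h0]
    exact ⟨hleaves, hcnt, hwf, hlen⟩
  | some j =>
    have hidx0 : 0 ≤ PySem.Int.mod (PySem.Int.mod i k + j) k := PySem.Int.mod_nonneg _ hk
    have hidx1 : PySem.Int.mod (PySem.Int.mod i k + j) k < k := PySem.Int.mod_lt _ hk
    have hOB : (pvFirst (PySem.Int.mod i k) k (fun j => decide (PySem.List.pyGetD st.1.toList j 0 ≤ PySem.List.pyGetD m i 0))).or
        (pvFirst 0 k (fun j => decide (PySem.List.pyGetD st.1.toList j 0 ≤ PySem.List.pyGetD m i 0)))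
        = some (PySem.Int.mod (PySem.Int.mod i k + j) k) := by
      rw [← hA, hOA]; rfl
    have hmatch : (match pvFirst (PySem.Int.mod i k) k (fun j => decide (PySem.List.pyGetD st.1.toList j 0 ≤ PySem.List.pyGetD m i 0)) with
        | some j => some j
        | none => pvFirst 0 k (fun j => decide (PySem.List.pyGetD st.1.toList j 0 ≤ PySem.List.pyGetD m i 0)))
        = some (PySem.Int.mod (PySem.Int.mod i k + j) k) := by
      cases hy : pvFirst (PySem.Int.mod i k) k (fun j => decide (PySem.List.pyGetD st.1.toList j 0 ≤ PySem.List.pyGetD m i 0)) with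
      | some y => rw [hy] at hOB; simpa [Option.or] using hOB
      | none => rw [hy] at hOB; simpa [Option.or] using hOB
    rw [hAeq, hBeq, hOA, hq1, hq0, hmatch]
    have hidxlt : PySem.Int.mod (PySem.Int.mod i k + j) k < ((pvLeaves stB.1).length : Int) := by omega
    obtain ⟨hup, hupwf⟩ := pv_upd_spec stB.1 (PySem.Int.mod (PySem.Int.mod i k + j) k)
      (PySem.List.pyGetD m i 0 + PySem.List.pyGetD n i 0) hwf hidx0 hidxlt
    refine ⟨?_, ?_, hupwf, ?_⟩
    · show pvLeaves (pvUpd stB.1 _ _) = _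
      rw [hup, hleaves, pvASet_toList]
    · show pvASet stB.2 _ _ = pvASet st.2 _ _
      rw [hcnt]
    · show (pvASet st.1 _ _).toList.length = _
      rw [pvASet_toList, List.length_set, hlen]

lemma pv_fold_rel (k : Int) (m n : List Int) (hk : 0 < k) (l : List Int)
    (st : Array Int × Array Int) (stB : PvTree × Array Int) (h : pvRel k st stB) :
    pvRel k (l.foldl (pvStepA k m n) st) (l.foldl (pvStepB k m n) stB) := by
  induction l generalizing st stB with
  | nil => exact h
  | cons y tl ih =>
    exact ih _ _ (pv_step_rel k m n hk st stB y h)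

-- ===== VERDICT =====
theorem find_busiest_servers_spec : Claim_equal_find_busiest_servers := by
  intro k m n hdom hpre
  obtain ⟨hk1, hmn⟩ := hpre
  have hk : 0 < k := by omega
  obtain ⟨hbuildL, hbuildWF⟩ := pv_build_spec k hk1
  have hinit : pvRel k ((List.replicate k.toNat 0).toArray, (List.replicate k.toNat 0).toArray)
      (pvBuild k, (List.replicate k.toNat 0).toArray) := by
    refine ⟨?_, rfl, hbuildWF, ?_⟩ <;> simp [hbuildL]
  have hrel := pv_fold_rel k m n hk (PySem.List.pyRange 0 (m.length : Int) 1)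
      ((List.replicate k.toNat 0).toArray, (List.replicate k.toNat 0).toArray)
      (pvBuild k, (List.replicate k.toNat 0).toArray) hinit
  show find_busiest_servers k m n = find_busiest_servers_alt k m n
  simp only [find_busiest_servers, find_busiest_servers_alt]
  obtain ⟨_, hcnt, _, _⟩ := hrel
  rw [hcnt]
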